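-- pv_equiv track=rewrite | github.com/roctbb/ai-game-engine | games/road_star_duel/engine.py | _placements
-- ===== SOURCE A (Python) =====
-- _SLOTS = ("red", "blue")
--
-- def _placements(role_team: dict[str, str], slot_scores: dict[str, int]) -> dict[str, int]:
--     ordered = sorted(_SLOTS, key=lambda slot: slot_scores[slot], reverse=True)
--     result: dict[str, int] = {}
--     last_score: int | None = None
--     last_place = 0
--     for index, slot in enumerate(ordered, start=1):
--         score = slot_scores[slot]
--         if score != last_score:
--             last_place = index
--             last_score = score
--         result[role_team[slot]] = last_place
--     return result
-- ===== SOURCE B (Python) =====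
-- _SLOTS = ("red", "blue")
--
-- def _placements(role_team: dict[str, str], slot_scores: dict[str, int]) -> dict[str, int]:
--     # place of a slot = 1 + number of slots with a strictly greater score;
--     # build the dict in descending-score order (blue first only when it strictly wins).
--     red, blue = slot_scores["red"], slot_scores["blue"]
--     red_place = 1 + (1 if blue > red else 0)
--     blue_place = 1 + (1 if red > blue else 0)
--     if blue > red:
--         return {role_team["blue"]: blue_place, role_team["red"]: red_place}
--     return {role_team["red"]: red_place, role_team["blue"]: blue_place}
-- ===== Notes on version B (the rewrite author's own statement) =====
-- stated objective: simpler
-- what changed: Replaced A's sort of the two slots plus enumerate loop with a last_score/last_place running tracker by a direct closed-form rank (1 + count of strictly greater scores) for each slot, with an explicit descending-order dict construction.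
import Mathlib
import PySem

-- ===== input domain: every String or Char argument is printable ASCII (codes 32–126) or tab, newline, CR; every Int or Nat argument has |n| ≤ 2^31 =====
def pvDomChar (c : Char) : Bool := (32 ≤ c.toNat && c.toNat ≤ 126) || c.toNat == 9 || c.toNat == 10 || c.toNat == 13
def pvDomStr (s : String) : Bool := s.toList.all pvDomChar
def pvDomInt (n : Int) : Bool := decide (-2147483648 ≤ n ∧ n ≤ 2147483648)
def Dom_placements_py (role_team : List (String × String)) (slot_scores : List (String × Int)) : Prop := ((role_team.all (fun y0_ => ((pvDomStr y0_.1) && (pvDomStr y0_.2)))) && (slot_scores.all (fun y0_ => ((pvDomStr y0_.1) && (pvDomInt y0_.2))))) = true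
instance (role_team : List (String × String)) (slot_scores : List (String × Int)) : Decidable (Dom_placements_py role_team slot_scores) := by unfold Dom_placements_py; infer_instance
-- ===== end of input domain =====

-- B replaces A's sort-and-scan last_score/last_place state machine by a direct
-- count-of-strictly-greater-scores rank for each of the two slots (objective: simpler).

-- ===== PORT A =====
-- literal port of A: sorted(_SLOTS, key=…, reverse=True), then the enumerate loop
-- carrying (result, last_score, last_place). Dict lookups slot_scores[slot] /
-- role_team[slot] are total here via getD; Pre_ excludes the KeyError inputs.
def placements_py (role_team : List (String × String)) (slot_scores : List (String × Int)) : List (String × Int) :=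
  let scores := PySem.Dict.mk slot_scores
  let teams := PySem.Dict.mk role_team
  let ordered := PySem.List.sorted ["red", "blue"] (fun slot => scores.getD slot 0) true
  let final := (PySem.List.enumerate ordered 1).foldl
    (fun (st : PySem.Dict String Int × Option Int × Int) p =>
      let score := scores.getD p.2 0
      let lastScore := if some score ≠ st.2.1 then some score else st.2.1
      let lastPlace := if some score ≠ st.2.1 then p.1 else st.2.2
      (st.1.insert (teams.getD p.2 "") lastPlace, lastScore, lastPlace))
    (PySem.Dict.empty, none, 0)
  final.1.items

-- ===== PORT B =====
def placements_py_alt (role_team : List (String × String)) (slot_scores : List (String × Int)) : List (String × Int) :=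
  let scores := PySem.Dict.mk slot_scores
  let teams := PySem.Dict.mk role_team
  let red := scores.getD "red" 0
  let blue := scores.getD "blue" 0
  let redPlace : Int := 1 + (if blue > red then 1 else 0)
  let bluePlace : Int := 1 + (if red > blue then 1 else 0)
  if blue > red then
    ((PySem.Dict.empty.insert (teams.getD "blue" "") bluePlace).insert (teams.getD "red" "") redPlace).items
  else
    ((PySem.Dict.empty.insert (teams.getD "red" "") redPlace).insert (teams.getD "blue" "") bluePlace).items

-- ===== PRECONDITION & SPEC =====
-- Pre_ excludes exactly the inputs where Python A raises KeyError: one of the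
-- slot keys "red"/"blue" missing from slot_scores or from role_team.
def Pre_placements_py (role_team : List (String × String)) (slot_scores : List (String × Int)) : Prop :=
  (PySem.Dict.mk slot_scores).contains "red" = true ∧
  (PySem.Dict.mk slot_scores).contains "blue" = true ∧
  (PySem.Dict.mk role_team).contains "red" = true ∧
  (PySem.Dict.mk role_team).contains "blue" = true
instance (role_team : List (String × String)) (slot_scores : List (String × Int)) : Decidable (Pre_placements_py role_team slot_scores) := by unfold Pre_placements_py; infer_instance
def pvWitness_placements_py : (List (String × String)) × (List (String × Int)) :=
  ([("red", "Team A"), ("blue", "Team B")], [("red", 3), ("blue", 7)])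

def Spec_placements_py (role_team : List (String × String)) (slot_scores : List (String × Int)) (out : List (String × Int)) : Prop := out = placements_py_alt role_team slot_scores
instance (role_team : List (String × String)) (slot_scores : List (String × Int)) (out : List (String × Int)) : Decidable (Spec_placements_py role_team slot_scores out) := by unfold Spec_placements_py; infer_instance

-- ===== CLAIM (what is proved, stated in full; the proofs are below) =====
def Claim_equal_placements_py : Prop := ∀ (role_team : List (String × String)) (slot_scores : List (String × Int)), Dom_placements_py role_team slot_scores → Pre_placements_py role_team slot_scores → Spec_placements_py role_team slot_scores (placements_py role_team slot_scores)

-- ===== LEMMAS AND PROOFS =====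

-- ===== VERDICT (by name: the statement is the Claim_ definition above) =====
theorem placements_py_spec : Claim_equal_placements_py := by
  intro role_team slot_scores _ _
  unfold Spec_placements_py placements_py placements_py_alt
  rcases lt_trichotomy ((PySem.Dict.mk slot_scores).getD "red" 0) ((PySem.Dict.mk slot_scores).getD "blue" 0) with h | h | h
  · simp [PySem.List.sorted, PySem.List.insertBy, PySem.List.enumerate, h, not_lt.mpr h.le, h.ne]
  · simp [PySem.List.sorted, PySem.List.insertBy, PySem.List.enumerate, h]
  · simp [PySem.List.sorted, PySem.List.insertBy, PySem.List.enumerate, h, not_lt.mpr h.le, h.ne]
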